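-- pv_equiv track=rewrite | github.com/skyler-saucedo/digital-rules-module-1 | src/lsu_json_to_csv.py | rename_column
-- ===== SOURCE A (Python) =====
-- def rename_column(column_name):
--     r = column_name.split('.')
--     result = []
--     current_element = r[0]
--     count = 1
--
--     for element in r[1:]:
--         if element == current_element:
--             count += 1
--         else:
--             if count > 1:
--                 result.append(f"{current_element}_{count}")
--             else:
--                 result.append(current_element)
--             current_element = element
--             count = 1
--
--     # Append the last element
--     if count > 1:
--         result.append(f"{current_element}_{count}")
--     else:
--         result.append(current_element)
--
--     # combine
--     new_col_name = ''
--     for z in result: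
--         new_col_name = new_col_name + '-' + z
--     new_col_name = new_col_name[1:]
--
--     return new_col_name
-- ===== SOURCE B (Python) =====
-- def rename_column(column_name):
--     def rle(segs):
--         if not segs:
--             return []
--         head = segs[0]
--         run = 1
--         while run < len(segs) and segs[run] == head:
--             run += 1
--         label = f"{head}_{run}" if run > 1 else head
--         return [label] + rle(segs[run:])
--     return '-'.join(rle(column_name.split('.')))
-- ===== Notes on version B (the rewrite author's own statement) =====
-- stated objective: simpler
-- what changed: Replaced the explicit current_element/count state machine with its duplicated last-run append and the prefix-stripping dash-concatenation loop by a recursive run-length encoding over the split segments combined with str.join.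
import Mathlib
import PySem

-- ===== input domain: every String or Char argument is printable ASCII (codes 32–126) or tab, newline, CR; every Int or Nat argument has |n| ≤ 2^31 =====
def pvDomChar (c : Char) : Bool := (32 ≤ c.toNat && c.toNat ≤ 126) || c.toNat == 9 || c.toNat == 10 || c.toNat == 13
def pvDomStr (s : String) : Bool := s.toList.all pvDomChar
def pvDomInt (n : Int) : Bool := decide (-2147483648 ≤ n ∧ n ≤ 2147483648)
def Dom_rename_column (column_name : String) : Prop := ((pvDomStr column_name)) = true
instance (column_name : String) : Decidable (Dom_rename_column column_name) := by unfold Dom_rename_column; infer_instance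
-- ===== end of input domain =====

-- B replaces A's current_element/count state machine (with its duplicated last-run append and
-- prefix-stripping dash-concatenation loop) by a recursive run-length encoding combined with str.join;
-- objective: simpler.

-- ===== PORT A =====
-- split(.) always returns a nonempty list, so the python r[0] never raises; the [] branch is unreachable.
-- count starts at 1 and only increments, so it is kept as a Nat and cast to Int for str().
def rename_column (column_name : String) : String :=
  let r := PySem.Chars.splitOn column_name.toList ['.']
  match r with
  | [] => ""
  | r0 :: rest =>
    let st := rest.foldl
      (fun (s : List (List Char) × List Char × Nat) element =>
        if element == s.2.1 then (s.1, s.2.1, s.2.2 + 1)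
        else (s.1 ++ [if s.2.2 > 1 then s.2.1 ++ '_' :: PySem.Int.toChars (s.2.2 : Int) else s.2.1],
              element, 1))
      ([], r0, 1)
    let result := st.1 ++ [if st.2.2 > 1 then st.2.1 ++ '_' :: PySem.Int.toChars (st.2.2 : Int) else st.2.1]
    let newcol := result.foldl (fun acc z => acc ++ '-' :: z) []
    String.mk (PySem.List.slice newcol (some 1) none)

-- ===== PORT B =====
-- run length of the leading segment in the tail (the python while loop counting matches)
def runB (h : List Char) : List (List Char) → Nat
  | [] => 0
  | x :: t => if x == h then runB h t + 1 else 0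

def rleB : List (List Char) → List (List Char)
  | [] => []
  | h :: t =>
    let k := runB h t
    (if k + 1 > 1 then h ++ '_' :: PySem.Int.toChars ((k + 1 : Nat) : Int) else h)
      :: rleB (t.drop k)
termination_by l => l.length
decreasing_by simp only [List.length_drop, List.length_cons]; omega

def rename_column_alt (column_name : String) : String :=
  String.mk (PySem.Chars.join ['-'] (rleB (PySem.Chars.splitOn column_name.toList ['.'])))

-- ===== PRECONDITION & SPEC =====
def Spec_rename_column (column_name : String) (out : String) : Prop := out = rename_column_alt column_name
instance (column_name : String) (out : String) : Decidable (Spec_rename_column column_name out) := by unfold Spec_rename_column; infer_instance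

-- ===== CLAIM (what is proved, stated in full; the proofs are below) =====
def Claim_equal_rename_column : Prop := ∀ (column_name : String), Dom_rename_column column_name → Spec_rename_column column_name (rename_column column_name)

-- ===== LEMMAS AND PROOFS =====

-- the label both programs attach to a run of length c
def labelOf (cur : List Char) (c : Nat) : List Char :=
  if c > 1 then cur ++ '_' :: PySem.Int.toChars (c : Int) else cur

-- A's fold step
def stepA (s : List (List Char) × List Char × Nat) (element : List Char) :
    List (List Char) × List Char × Nat :=
  if element == s.2.1 then (s.1, s.2.1, s.2.2 + 1)
  else (s.1 ++ [labelOf s.2.1 s.2.2], element, 1)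

def finA (s : List (List Char) × List Char × Nat) : List (List Char) :=
  s.1 ++ [labelOf s.2.1 s.2.2]

theorem rleB_nil : rleB [] = [] := by rw [rleB.eq_def]

theorem rleB_cons (h : List Char) (t : List (List Char)) :
    rleB (h :: t) =
      (if runB h t + 1 > 1 then h ++ '_' :: PySem.Int.toChars ((runB h t + 1 : Nat) : Int) else h)
        :: rleB (t.drop (runB h t)) := by
  rw [rleB.eq_def]

theorem runB_replicate (cur : List Char) (k : Nat) :
    runB cur (List.replicate k cur) = k := by
  induction k with
  | zero => rfl
  | succ k ih => simp [List.replicate_succ, runB, ih]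

theorem runB_replicate_append (cur x : List Char) (k : Nat) (t : List (List Char))
    (hx : x ≠ cur) :
    runB cur (List.replicate k cur ++ x :: t) = k := by
  induction k with
  | zero => simp [runB, hx]
  | succ k ih => simp only [List.replicate_succ, List.cons_append, runB]; simp [ih]

theorem rleB_replicate (cur : List Char) (k : Nat) :
    rleB (List.replicate (k + 1) cur) = [labelOf cur (k + 1)] := by
  rw [List.replicate_succ, rleB_cons, runB_replicate]
  simp [labelOf, rleB_nil]

theorem rleB_replicate_append (cur x : List Char) (k : Nat) (t : List (List Char))
    (hx : x ≠ cur) :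
    rleB (List.replicate (k + 1) cur ++ x :: t) = labelOf cur (k + 1) :: rleB (x :: t) := by
  rw [List.replicate_succ, List.cons_append, rleB_cons,
    runB_replicate_append cur x k t hx]
  simp [labelOf]

-- the state machine, run to the end and finalized, produces exactly the run-length encoding
theorem machine_eq_rle (segs : List (List Char)) :
    ∀ (cur : List Char) (count : Nat) (res : List (List Char)), 1 ≤ count →
      finA (segs.foldl stepA (res, cur, count)) =
        res ++ rleB (List.replicate count cur ++ segs) := by
  induction segs with
  | nil =>
    intro cur count res hc
    obtain ⟨k, rfl⟩ : ∃ k, count = k + 1 := ⟨count - 1, by omega⟩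
    simp [finA, rleB_replicate]
  | cons x rest ih =>
    intro cur count res hc
    obtain ⟨k, rfl⟩ : ∃ k, count = k + 1 := ⟨count - 1, by omega⟩
    by_cases hx : x = cur
    · subst hx
      rw [List.foldl_cons, show stepA (res, x, k + 1) x = (res, x, k + 2) by simp [stepA]]
      rw [ih x (k + 2) res (by omega)]
      congr 2
      simp [List.replicate_succ', List.append_assoc]
    · rw [List.foldl_cons,
        show stepA (res, cur, k + 1) x = (res ++ [labelOf cur (k + 1)], x, 1) by
          simp [stepA, labelOf, hx]]
      rw [ih x 1 _ (by omega), rleB_replicate_append cur x k rest hx]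
      simp

-- the '-'-prefixing concatenation loop
theorem dash_foldl (l : List (List Char)) :
    ∀ a : List Char,
      l.foldl (fun acc z => acc ++ '-' :: z) a =
        a ++ (if l = [] then [] else '-' :: PySem.Chars.join ['-'] l) := by
  induction l with
  | nil => simp
  | cons h t ih =>
    intro a
    rw [List.foldl_cons, ih]
    cases t with
    | nil => simp [PySem.Chars.join_singleton]
    | cons q r => simp [PySem.Chars.join_cons_cons]

theorem rename_eq (s : String) : rename_column s = rename_column_alt s := by
  unfold rename_column rename_column_alt
  cases hr : PySem.Chars.splitOn s.toList ['.'] with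
  | nil => rw [rleB_nil, PySem.Chars.join_nil]; rfl
  | cons r0 rest =>
    have hm := machine_eq_rle rest r0 1 [] (le_refl 1)
    simp only [List.replicate_one, List.singleton_append, List.nil_append] at hm
    have hne : rleB (r0 :: rest) ≠ [] := by rw [rleB_cons]; simp
    show String.mk (PySem.List.slice
        ((finA (rest.foldl stepA ([], r0, 1))).foldl (fun acc z => acc ++ '-' :: z) [])
        (some 1) none) =
      String.mk (PySem.Chars.join ['-'] (rleB (r0 :: rest)))
    rw [hm, dash_foldl, if_neg hne, List.nil_append,
      PySem.List.slice_from _ (by norm_num)]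
    simp

-- ===== VERDICT (by name: the statement is the Claim_ definition above) =====
theorem rename_column_spec : Claim_equal_rename_column := by
  intro s _
  unfold Spec_rename_column
  exact rename_eq s
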